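-- pv_equiv track=rewrite | github.com/acybppres/Lothar | Collatz/kenglish/mrlattice.py | generationIntegersForwardWithMeta
-- ===== SOURCE A (Python) =====
-- def generationIntegersForwardWithMeta_(a, previous):
--     """
--     Supporting function for next method, generates next generation from the previous
--     """
--     for n_a_b_l in previous:
--         # Ignore the $a$ in the tuple
--         n, _, b, label = n_a_b_l
--         label_ = "1" + label
--         yield (2 * n, a, b, label_)
--         numer = 2*n - 1
--         if numer % 3 == 0:
--             n_ = numer // 3
--             label_ = "0" + label
--             # Skip degenerate values:
--             if label_[-2:] != "01":
--                 yield (n_, a, b+1, label_)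
--
-- def generationIntegersForwardWithMeta(a):
--     """
--     Quickly generate all integers in the Collatz tree out to the given generation
--     """
--     # The starting point
--     previous = [(1, 0, 0, "")]
--     yield previous[0]
--
--     for a_ in range(1, a+1):
--         accum = []
--         for tup_yielded in generationIntegersForwardWithMeta_(a_, previous):
--             accum.append(tup_yielded)
--             yield tup_yielded
--         previous = accum
-- ===== SOURCE B (Python) =====
-- def generationIntegersForwardWithMeta(a):
--     """
--     Single-pass BFS: one FIFO queue of (n, gen, b, label) nodes replaces the
--     per-generation list rebuilding; each node carries its own generation.
--     """
--     queue = [(1, 0, 0, "")]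
--     yield queue[0]
--     i = 0
--     while i < len(queue):
--         n, gen, b, label = queue[i]
--         i += 1
--         if gen < a:
--             child = (2 * n, gen + 1, b, "1" + label)
--             yield child
--             queue.append(child)
--             numer = 2 * n - 1
--             if numer % 3 == 0:
--                 lab = "0" + label
--                 if lab[-2:] != "01":
--                     child = (numer // 3, gen + 1, b + 1, lab)
--                     yield child
--                     queue.append(child)
-- ===== Notes on version B (the rewrite author's own statement) =====
-- stated objective: alternative
-- what changed: Replaced the outer range(1,a+1) loop that rebuilds a whole-generation list each pass with a single FIFO queue of (n, gen, b, label) nodes, each carrying its own generation; one while loop over the queue replaces the nested generation/accumulator loops and reproduces the exact level-order output.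
import Mathlib
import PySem

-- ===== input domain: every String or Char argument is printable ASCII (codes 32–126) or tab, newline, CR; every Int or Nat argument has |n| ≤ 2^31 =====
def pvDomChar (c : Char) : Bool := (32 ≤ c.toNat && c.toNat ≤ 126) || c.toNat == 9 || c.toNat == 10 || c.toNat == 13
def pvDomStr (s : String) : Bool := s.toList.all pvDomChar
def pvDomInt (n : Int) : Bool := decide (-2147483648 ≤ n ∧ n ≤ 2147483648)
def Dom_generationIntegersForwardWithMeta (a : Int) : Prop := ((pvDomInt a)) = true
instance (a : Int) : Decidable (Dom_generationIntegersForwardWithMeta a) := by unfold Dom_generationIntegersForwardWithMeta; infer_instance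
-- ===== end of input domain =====

-- B replaces A's generation-by-generation list rebuilding with a single FIFO queue of
-- (n, gen, b, label) nodes, each carrying its own generation (objective: alternative).

-- ===== PORT A =====
-- helper generationIntegersForwardWithMeta_: for one node, the 1 or 2 children it yields
-- ("1"+label / "0"+label ported as String.ofList (c :: label.toList); exact for any chars)
def pvChildrenStep (a : Int) (t : Int × Int × Int × String) :
    List (Int × Int × Int × String) :=
  let n := t.1
  let b := t.2.2.1
  let label := t.2.2.2
  let first := (2 * n, a, b, String.ofList ('1' :: label.toList))
  let numer := 2 * n - 1
  if PySem.Int.mod numer 3 = 0 then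
    let n_ := PySem.Int.floordiv numer 3
    let label_ := '0' :: label.toList
    -- label_[-2:] != "01"
    if PySem.List.slice label_ (some (-2)) none ≠ ['0', '1'] then
      [first, (n_, a, b + 1, String.ofList label_)]
    else [first]
  else [first]

-- 'for a_ in range(1, a+1): accum = list(helper(a_, previous)); yield from accum; previous = accum'
def pvLoopA (gens : List Int) (previous : List (Int × Int × Int × String)) :
    List (Int × Int × Int × String) :=
  match gens with
  | [] => []
  | g :: rest =>
    let accum := previous.flatMap (pvChildrenStep g)
    accum ++ pvLoopA rest accum

def generationIntegersForwardWithMeta (a : Int) : List (Int × Int × Int × String) :=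
  let previous : List (Int × Int × Int × String) := [(1, 0, 0, "")]
  (1, 0, 0, "") :: pvLoopA (PySem.List.pyRange 1 (a + 1) 1) previous

-- ===== PORT B =====
-- children of a popped queue node (empty once the node's generation has reached a)
def pvChildB (a : Int) (t : Int × Int × Int × String) :
    List (Int × Int × Int × String) :=
  let n := t.1
  let gen := t.2.1
  let b := t.2.2.1
  let label := t.2.2.2
  if gen < a then
    (2 * n, gen + 1, b, String.ofList ('1' :: label.toList)) ::
      (if PySem.Int.mod (2 * n - 1) 3 = 0 ∧
          PySem.List.slice ('0' :: label.toList) (some (-2)) none ≠ ['0', '1'] then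
        [(PySem.Int.floordiv (2 * n - 1) 3, gen + 1, b + 1, String.ofList ('0' :: label.toList))]
      else [])
  else []

-- termination weight of a queue node
def pvW (a : Int) (t : Int × Int × Int × String) : Nat := 3 ^ (a - t.2.1).toNat

theorem pvChildB_measure (a : Int) (x : Int × Int × Int × String) :
    2 * ((pvChildB a x).map (pvW a)).sum + (pvChildB a x).length ≤ 2 * pvW a x := by
  obtain ⟨n, gen, b, l⟩ := x
  by_cases hg : gen < a
  · have hk : (a - gen).toNat = (a - (gen + 1)).toNat + 1 := by omega
    have hp : 1 ≤ 3 ^ (a - (gen + 1)).toNat := Nat.one_le_pow _ _ (by omega)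
    simp only [pvChildB, hg, if_true]
    split <;>
      simp only [List.map_cons, List.map_nil, List.sum_cons, List.sum_nil,
        List.length_cons, List.length_nil, pvW, hk, pow_succ] <;> omega
  · simp [pvChildB, pvW, hg]

-- the FIFO loop: pop the front node, emit and enqueue its children
def pvRunB (a : Int) (q : List (Int × Int × Int × String)) :
    List (Int × Int × Int × String) :=
  match q with
  | [] => []
  | x :: rest =>
    let cs := pvChildB a x
    cs ++ pvRunB a (rest ++ cs)
termination_by 2 * (q.map (pvW a)).sum + q.length
decreasing_by
  have h := pvChildB_measure a x
  simp only [List.map_append, List.sum_append, List.length_append, List.map_cons,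
    List.sum_cons, List.length_cons]
  omega

def generationIntegersForwardWithMeta_alt (a : Int) : List (Int × Int × Int × String) :=
  (1, 0, 0, "") :: pvRunB a [(1, 0, 0, "")]

-- ===== PRECONDITION & SPEC =====
def Spec_generationIntegersForwardWithMeta (a : Int) (out : List (Int × Int × Int × String)) : Prop := out = generationIntegersForwardWithMeta_alt a
instance (a : Int) (out : List (Int × Int × Int × String)) : Decidable (Spec_generationIntegersForwardWithMeta a out) := by unfold Spec_generationIntegersForwardWithMeta; infer_instance

-- ===== CLAIM (what is proved, stated in full; the proofs are below) =====
def Claim_equal_generationIntegersForwardWithMeta : Prop := ∀ (a : Int), Dom_generationIntegersForwardWithMeta a → Spec_generationIntegersForwardWithMeta a (generationIntegersForwardWithMeta a)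

-- ===== LEMMAS AND PROOFS =====

-- every child produced for generation parameter g carries g in its second slot
theorem pvChildrenStep_gen (g : Int) (x y : Int × Int × Int × String)
    (hy : y ∈ pvChildrenStep g x) : y.2.1 = g := by
  obtain ⟨n, gen, b, l⟩ := x
  simp only [pvChildrenStep] at hy
  split_ifs at hy <;>
    simp only [List.mem_cons, List.not_mem_nil, or_false] at hy <;>
    (rcases hy with rfl | rfl <;> rfl)

-- bridge: B's children of a node of generation g are A's children for parameter g+1
theorem pvChildB_eq (a g : Int) (x : Int × Int × Int × String)
    (hx : x.2.1 = g) (hg : g < a) : pvChildB a x = pvChildrenStep (g + 1) x := by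
  obtain ⟨n, gen, b, l⟩ := x
  simp only at hx; subst hx
  simp only [pvChildB, pvChildrenStep, hg, if_true]
  split_ifs <;> first | rfl | tauto

-- B stops producing once every queued node has generation ≥ a
theorem pvChildB_nil (a : Int) (x : Int × Int × Int × String) (hx : ¬ x.2.1 < a) :
    pvChildB a x = [] := by
  obtain ⟨n, gen, b, l⟩ := x
  simp only at hx
  simp [pvChildB, hx]

-- FIFO queue lemma: processing q1 ++ q2 emits q1's children, then continues with them enqueued
theorem pvRunB_append (a : Int) (q1 : List (Int × Int × Int × String)) :
    ∀ q2, pvRunB a (q1 ++ q2) =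
      q1.flatMap (pvChildB a) ++ pvRunB a (q2 ++ q1.flatMap (pvChildB a)) := by
  induction q1 with
  | nil => intro q2; simp
  | cons x r ih =>
    intro q2
    rw [List.cons_append, pvRunB]
    rw [List.append_assoc r q2 (pvChildB a x), ih (q2 ++ pvChildB a x)]
    simp [List.flatMap_cons]

-- main invariant: if every node of prev has generation g, the queue run equals
-- A's remaining generation-by-generation loop
theorem pvMain (a : Int) : ∀ (k : Nat) (g : Int) (prev : List (Int × Int × Int × String)),
    (a - g).toNat = k → (∀ x ∈ prev, x.2.1 = g) →
    pvRunB a prev = pvLoopA (PySem.List.pyRange (g + 1) (a + 1) 1) prev := by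
  intro k
  induction k with
  | zero =>
    intro g prev hk hgen
    have hga : a ≤ g := by omega
    have hC : prev.flatMap (pvChildB a) = [] := by
      simp only [List.flatMap_eq_nil_iff]
      intro x hx; exact pvChildB_nil a x (by have := hgen x hx; omega)
    have h1 := pvRunB_append a prev []
    simp only [List.append_nil, hC, List.nil_append] at h1
    rw [h1, pvRunB, PySem.List.pyRange_one_eq_nil (by omega), pvLoopA]
  | succ k ih =>
    intro g prev hk hgen
    have hg : g < a := by omega
    have hC : prev.flatMap (pvChildB a) = prev.flatMap (pvChildrenStep (g + 1)) :=
      List.flatMap_congr (fun x hx => pvChildB_eq a g x (hgen x hx) hg)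
    have h1 := pvRunB_append a prev []
    simp only [List.append_nil, List.nil_append] at h1
    rw [h1, hC, PySem.List.pyRange_one_cons (by omega), pvLoopA]
    congr 1
    have := ih (g + 1) (prev.flatMap (pvChildrenStep (g + 1))) (by omega)
      (fun y hy => by
        rcases List.mem_flatMap.mp hy with ⟨x, _, hyx⟩
        exact pvChildrenStep_gen (g + 1) x y hyx)
    exact this

-- ===== VERDICT (by name: the statement is the Claim_ definition above) =====
theorem generationIntegersForwardWithMeta_spec : Claim_equal_generationIntegersForwardWithMeta := by
  intro a _
  show _ = _
  simp only [generationIntegersForwardWithMeta, generationIntegersForwardWithMeta_alt]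
  congr 1
  have h := pvMain a (a - 0).toNat 0 [(1, 0, 0, "")] rfl (by simp)
  simp only [zero_add] at h
  exact h.symm
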